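-- pv_equiv track=rewrite | github.com/DancingOnAir/LeetcodePythonSolution | binary_search/3824_minimum_k_to_reduce_array_within_limit.py | minimumK
-- ===== SOURCE A (Python) =====
-- from typing import List
-- from math import ceil, sqrt
--
-- def minimumK(nums: List[int]) -> int:
--     n = len(nums)
--
--     def check(k):
--         return n + sum((x - 1) // k for x in nums) <= k * k
--
--     left = ceil(sqrt(n))
--     right = max(nums)
--     while left < right:
--         mid = (left + right) // 2
--         if check(mid):
--             right = mid
--         else:
--             left = mid + 1
--     return left
-- ===== SOURCE B (Python) =====
-- from typing import List
-- from math import ceil, sqrt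
--
-- def minimumK(nums: List[int]) -> int:
--     # Linear sweep: the predicate is monotone in k, so the first k in
--     # [ceil(sqrt(n)), max(nums)) satisfying it (or the upper bound) is the answer.
--     n = len(nums)
--     k = ceil(sqrt(n))
--     right = max(nums)
--     while k < right and n + sum((x - 1) // k for x in nums) > k * k:
--         k += 1
--     return k
-- ===== Notes on version B (the rewrite author's own statement) =====
-- stated objective: simpler
-- what changed: Replaces the halving binary search over [ceil(sqrt(n)), max(nums)) by a single increasing linear sweep returning the first k that satisfies the same check predicate; Pre_ excludes empty lists (max raises) and lists that reach the check loop while containing an element below 1-ceil(sqrt(n)), where the check predicate need not be monotone and the binary search's returned k is an accident of probe order.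
import Mathlib
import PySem

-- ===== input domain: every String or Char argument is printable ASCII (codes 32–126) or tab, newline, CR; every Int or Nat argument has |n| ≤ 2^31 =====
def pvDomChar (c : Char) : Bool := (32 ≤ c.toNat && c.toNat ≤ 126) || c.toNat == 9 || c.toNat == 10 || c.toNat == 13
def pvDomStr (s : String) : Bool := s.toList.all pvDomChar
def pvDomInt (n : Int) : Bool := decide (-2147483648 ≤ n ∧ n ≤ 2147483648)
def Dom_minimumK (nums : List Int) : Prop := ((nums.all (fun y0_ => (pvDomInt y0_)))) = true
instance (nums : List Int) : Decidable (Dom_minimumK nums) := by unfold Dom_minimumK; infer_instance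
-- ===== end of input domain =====

-- B replaces A's binary search by a single increasing linear sweep for the same
-- predicate (objective: simpler); equal on Pre_, where the predicate is monotone
-- on the probed range.

-- ceil(sqrt(n)) on a Nat, exact for every length a Python list can have
-- (math.sqrt is correctly rounded, so math.ceil(math.sqrt(n)) equals the
-- integer ceiling square root for these n).
def pvCeilSqrt (n : Nat) : Int :=
  if Nat.sqrt n * Nat.sqrt n = n then (Nat.sqrt n : Int) else (Nat.sqrt n : Int) + 1

-- ===== PORT A =====
-- check(k) = n + sum((x - 1) // k for x in nums) <= k * k
def checkA (nums : List Int) (n k : Int) : Bool :=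
  decide (n + nums.foldl (fun s x => s + PySem.Int.floordiv (x - 1) k) 0 ≤ k * k)

-- the while-loop of A: left/right halving
def aloop (nums : List Int) (n l r : Int) : Int :=
  if l < r then
    let mid := PySem.Int.floordiv (l + r) 2
    if checkA nums n mid then aloop nums n l mid
    else aloop nums n (mid + 1) r
  else l
termination_by (r - l).toNat
decreasing_by
  · have h1 : l ≤ PySem.Int.floordiv (l + r) 2 := by
      rw [PySem.Int.le_floordiv_iff_mul_le (by omega : (0:Int) < 2)]; omega
    have h2 : PySem.Int.floordiv (l + r) 2 < r := by
      rw [PySem.Int.floordiv_lt_iff_lt_mul (by omega : (0:Int) < 2)]; omega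
    omega
  · have h1 : l ≤ PySem.Int.floordiv (l + r) 2 := by
      rw [PySem.Int.le_floordiv_iff_mul_le (by omega : (0:Int) < 2)]; omega
    have h2 : PySem.Int.floordiv (l + r) 2 < r := by
      rw [PySem.Int.floordiv_lt_iff_lt_mul (by omega : (0:Int) < 2)]; omega
    omega

def minimumK (nums : List Int) : Int :=
  let n : Int := nums.length
  let left := pvCeilSqrt nums.length
  match PySem.List.max? nums (fun y => y) with
  | none => 0   -- Python: max([]) raises ValueError; excluded by Pre_minimumK
  | some right => aloop nums n left right

-- ===== PORT B =====
-- while k < right and n + sum((x - 1) // k for x in nums) > k * k: k += 1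
def bloop (nums : List Int) (n k r : Int) : Int :=
  if k < r then
    if n + nums.foldl (fun s x => s + PySem.Int.floordiv (x - 1) k) 0 > k * k then
      bloop nums n (k + 1) r
    else k
  else k
termination_by (r - k).toNat

def minimumK_alt (nums : List Int) : Int :=
  let n : Int := nums.length
  let k := pvCeilSqrt nums.length
  match PySem.List.max? nums (fun y => y) with
  | none => 0   -- Python: max([]) raises ValueError; excluded by Pre_minimumK
  | some right => bloop nums n k right

-- ===== PRECONDITION & SPEC =====
-- Pre_ excludes empty lists (max raises ValueError) and lists that reach the
-- check loop (max > ceil(sqrt(n))) while containing an element below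
-- 1 - ceil(sqrt(n)): there the check predicate need not be monotone and the
-- binary search's returned k is an accident of probe order, neither value
-- being specified.
def Pre_minimumK (nums : List Int) : Prop :=
  nums ≠ [] ∧
    ((∀ x ∈ nums, 1 - pvCeilSqrt nums.length ≤ x) ∨
     (∀ x ∈ nums, x ≤ pvCeilSqrt nums.length))
instance (nums : List Int) : Decidable (Pre_minimumK nums) := by
  unfold Pre_minimumK; infer_instance

def pvWitness_minimumK : List Int := [5]

def Spec_minimumK (nums : List Int) (out : Int) : Prop := out = minimumK_alt nums
instance (nums : List Int) (out : Int) : Decidable (Spec_minimumK nums out) := by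
  unfold Spec_minimumK; infer_instance

-- ===== CLAIM (what is proved, stated in full; the proofs are below) =====
def Claim_equal_minimumK : Prop :=
  ∀ (nums : List Int), Dom_minimumK nums → Pre_minimumK nums →
    Spec_minimumK nums (minimumK nums)

-- ===== LEMMAS AND PROOFS =====

lemma foldl_add_map (xs : List Int) (f : Int → Int) (a : Int) :
    xs.foldl (fun s x => s + f x) a = a + (xs.map f).sum := by
  induction xs generalizing a with
  | nil => simp
  | cons y ys ih => simp [List.foldl, ih (a + f y)]; ring

lemma fdiv_anti (a k k' : Int) (ha : 0 ≤ a) (hk : 0 < k) (hkk : k ≤ k') :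
    PySem.Int.floordiv a k' ≤ PySem.Int.floordiv a k := by
  obtain ⟨m, rfl⟩ : ∃ m : Nat, a = (m : Int) := ⟨a.toNat, (Int.toNat_of_nonneg ha).symm⟩
  obtain ⟨u, rfl⟩ : ∃ u : Nat, k = (u : Int) := ⟨k.toNat, (Int.toNat_of_nonneg hk.le).symm⟩
  obtain ⟨v, rfl⟩ : ∃ v : Nat, k' = (v : Int) :=
    ⟨k'.toNat, (Int.toNat_of_nonneg (hk.trans_le hkk).le).symm⟩
  rw [PySem.Int.floordiv_natCast, PySem.Int.floordiv_natCast]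
  have : m / v ≤ m / u := Nat.div_le_div_left (by exact_mod_cast hkk) (by exact_mod_cast hk)
  exact_mod_cast this

lemma fdiv_neg_small (a k : Int) (hk : 0 < k) (h1 : -k ≤ a) (h2 : a < 0) :
    PySem.Int.floordiv a k = -1 := by
  rw [PySem.Int.floordiv_eq_iff_of_pos hk]
  constructor <;> nlinarith

lemma term_mono (x L i j : Int) (hL : 1 ≤ L) (hx : 1 - L ≤ x) (hi : L ≤ i) (hij : i ≤ j) :
    PySem.Int.floordiv (x - 1) j ≤ PySem.Int.floordiv (x - 1) i := by
  by_cases hxa : 0 ≤ x - 1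
  · exact fdiv_anti _ _ _ hxa (by omega) hij
  · rw [fdiv_neg_small (x - 1) i (by omega) (by omega) (by omega),
        fdiv_neg_small (x - 1) j (by omega) (by omega) (by omega)]

lemma check_mono (nums : List Int) (n L i j : Int) (hL : 1 ≤ L)
    (hx : ∀ x ∈ nums, 1 - L ≤ x) (hi : L ≤ i) (hij : i ≤ j)
    (hc : checkA nums n i = true) : checkA nums n j = true := by
  unfold checkA at hc ⊢
  rw [decide_eq_true_iff] at hc ⊢
  rw [foldl_add_map] at hc ⊢
  have hsum : (nums.map (fun x => PySem.Int.floordiv (x - 1) j)).sum ≤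
      (nums.map (fun x => PySem.Int.floordiv (x - 1) i)).sum :=
    List.sum_le_sum (fun x hxm => term_mono x L i j hL (hx x hxm) hi hij)
  have hsq : i * i ≤ j * j := by nlinarith
  linarith

-- bloop stopped: empty range
lemma bloop_stop (nums : List Int) (n k r : Int) (h : ¬ k < r) :
    bloop nums n k r = k := by
  rw [bloop]; simp [h]

-- bloop truncates at a point where the check holds
lemma bloop_cut (nums : List Int) (n r m : Int) (hcm : checkA nums n m = true) :
    ∀ (N : Nat) (l : Int), (m - l).toNat ≤ N → l ≤ m → m < r →
      bloop nums n l r = bloop nums n l m := by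
  intro N
  induction N with
  | zero =>
    intro l hfuel hlm hmr
    have hl : l = m := by omega
    subst hl
    have hle : ¬ (n + nums.foldl (fun s x => s + PySem.Int.floordiv (x - 1) l) 0 > l * l) := by
      unfold checkA at hcm; rw [decide_eq_true_iff] at hcm; omega
    rw [bloop_stop nums n l l (by omega)]
    rw [bloop]
    simp [show l < r by omega, hle]
  | succ N ih =>
    intro l hfuel hlm hmr
    by_cases hlm' : l < m
    · by_cases hcl : n + nums.foldl (fun s x => s + PySem.Int.floordiv (x - 1) l) 0 > l * l
      · conv_lhs => rw [bloop]
        conv_rhs => rw [bloop]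
        simp only [if_pos (show l < r by omega), if_pos hlm', if_pos hcl]
        exact ih (l + 1) (by omega) (by omega) hmr
      · conv_lhs => rw [bloop]
        conv_rhs => rw [bloop]
        simp [show l < r by omega, hlm', hcl]
    · have hl : l = m := by omega
      subst hl
      have hle : ¬ (n + nums.foldl (fun s x => s + PySem.Int.floordiv (x - 1) l) 0 > l * l) := by
        unfold checkA at hcm; rw [decide_eq_true_iff] at hcm; omega
      rw [bloop_stop nums n l l (by omega)]
      rw [bloop]
      simp [show l < r by omega, hle]

-- bloop skips a prefix on which the check fails
lemma bloop_skip (nums : List Int) (n r : Int) :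
    ∀ (N : Nat) (l m : Int), (m - l).toNat ≤ N → l ≤ m → m ≤ r →
      (∀ j, l ≤ j → j < m → checkA nums n j = false) →
      bloop nums n l r = bloop nums n m r := by
  intro N
  induction N with
  | zero =>
    intro l m hfuel hlm hmr _
    have : l = m := by omega
    subst this; rfl
  | succ N ih =>
    intro l m hfuel hlm hmr hall
    by_cases hlm' : l < m
    · have hcl : checkA nums n l = false := hall l le_rfl hlm'
      have hgt : n + nums.foldl (fun s x => s + PySem.Int.floordiv (x - 1) l) 0 > l * l := by
        unfold checkA at hcl
        rw [decide_eq_false_iff_not] at hcl; omega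
      rw [bloop]
      simp only [if_pos (show l < r by omega), if_pos hgt]
      exact ih (l + 1) m (by omega) (by omega) hmr (fun j h1 h2 => hall j (by omega) h2)
    · have : l = m := by omega
      subst this; rfl

-- on a range where the check predicate is monotone the binary search equals the sweep
lemma loops_eq (nums : List Int) (n L : Int)
    (hm : ∀ i j, L ≤ i → i ≤ j → checkA nums n i = true → checkA nums n j = true) :
    ∀ (N : Nat) (l r : Int), (r - l).toNat ≤ N → L ≤ l →
      aloop nums n l r = bloop nums n l r := by
  intro N
  induction N with
  | zero =>
    intro l r hfuel hl
    have hlr : ¬ l < r := by omega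
    rw [aloop, bloop]; simp [hlr]
  | succ N ih =>
    intro l r hfuel hl
    by_cases hlr : l < r
    · have h1 : l ≤ PySem.Int.floordiv (l + r) 2 := by
        rw [PySem.Int.le_floordiv_iff_mul_le (by omega : (0:Int) < 2)]; omega
      have h2 : PySem.Int.floordiv (l + r) 2 < r := by
        rw [PySem.Int.floordiv_lt_iff_lt_mul (by omega : (0:Int) < 2)]; omega
      by_cases hc : checkA nums n (PySem.Int.floordiv (l + r) 2) = true
      · rw [aloop]
        simp only [if_pos hlr, hc, if_pos]
        rw [bloop_cut nums n r _ hc (PySem.Int.floordiv (l + r) 2 - l).toNat l le_rfl h1 h2]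
        exact ih l _ (by omega) hl
      · rw [aloop]
        simp only [if_pos hlr, hc, if_neg, Bool.false_eq_true, if_false]
        rw [bloop_skip nums n r (PySem.Int.floordiv (l + r) 2 + 1 - l).toNat l
              (PySem.Int.floordiv (l + r) 2 + 1) le_rfl (by omega) (by omega)
              (fun j hj1 hj2 => by
                cases hcj : checkA nums n j with
                | false => rfl
                | true =>
                  exact absurd (hm j (PySem.Int.floordiv (l + r) 2) (le_trans hl hj1) (by omega) hcj)
                    (by simpa using hc))]
        exact ih _ r (by omega) (by omega)
    · rw [aloop, bloop]; simp [hlr]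

lemma pvCeilSqrt_pos (n : Nat) (h : 0 < n) : 1 ≤ pvCeilSqrt n := by
  unfold pvCeilSqrt
  have hs : 0 < Nat.sqrt n := Nat.sqrt_pos.mpr h
  split <;> [exact_mod_cast hs; push_cast <;> omega]

-- ===== VERDICT (by name: the statement is the Claim_ definition above) =====
theorem minimumK_spec : Claim_equal_minimumK := by
  intro nums _ hpre
  obtain ⟨hne, hreg⟩ := hpre
  unfold Spec_minimumK minimumK minimumK_alt
  cases hmax : PySem.List.max? nums (fun y => y) with
  | none => rfl
  | some right =>
    simp only []
    have hlen : 0 < nums.length := List.length_pos_iff.mpr hne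
    have hL1 : 1 ≤ pvCeilSqrt nums.length := pvCeilSqrt_pos _ hlen
    cases hreg with
    | inl hlow =>
      exact loops_eq nums _ (pvCeilSqrt nums.length)
        (fun i j hi hij hc =>
          check_mono nums _ (pvCeilSqrt nums.length) i j hL1 hlow hi hij hc)
        (right - pvCeilSqrt nums.length).toNat _ _ le_rfl le_rfl
    | inr hhigh =>
      have hmem : right ∈ nums := PySem.List.max?_mem hmax
      have hrL : right ≤ pvCeilSqrt nums.length := hhigh right hmem
      rw [aloop, bloop]
      simp [show ¬ pvCeilSqrt nums.length < right by omega]
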